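-- pv_equiv track=rewrite | github.com/kfuku52/cdskit | cdskit/maxalign.py | build_variable_subset_masks
-- ===== SOURCE A (Python) =====
-- def build_variable_subset_masks(variable_indices):
--     max_mask = 1 << len(variable_indices)
--     subset_masks = [0] * max_mask
--     for subset_mask in range(1, max_mask):
--         lsb = subset_mask & -subset_mask
--         bit_idx = lsb.bit_length() - 1
--         subset_masks[subset_mask] = subset_masks[subset_mask ^ lsb] | (1 << variable_indices[bit_idx])
--     return subset_masks
-- ===== SOURCE B (Python) =====
-- def build_variable_subset_masks(variable_indices):
--     bit_values = [1 << i for i in variable_indices]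
--
--     def mask_value(mask):
--         acc = 0
--         for i, bv in enumerate(bit_values):
--             if (mask >> i) & 1:
--                 acc |= bv
--         return acc
--
--     return [mask_value(mask) for mask in range(1 << len(variable_indices))]
-- ===== Notes on version B (the rewrite author's own statement) =====
-- stated objective: alternative
-- what changed: A fills the 2^n table by dynamic programming, deriving each entry from the previously computed entry at mask^lsb via the m&-m/bit_length trick; B computes every mask's value independently from scratch by OR-ing the precomputed bit_values[i] for each bit i set in the mask, with no table reuse.
import Mathlib
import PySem

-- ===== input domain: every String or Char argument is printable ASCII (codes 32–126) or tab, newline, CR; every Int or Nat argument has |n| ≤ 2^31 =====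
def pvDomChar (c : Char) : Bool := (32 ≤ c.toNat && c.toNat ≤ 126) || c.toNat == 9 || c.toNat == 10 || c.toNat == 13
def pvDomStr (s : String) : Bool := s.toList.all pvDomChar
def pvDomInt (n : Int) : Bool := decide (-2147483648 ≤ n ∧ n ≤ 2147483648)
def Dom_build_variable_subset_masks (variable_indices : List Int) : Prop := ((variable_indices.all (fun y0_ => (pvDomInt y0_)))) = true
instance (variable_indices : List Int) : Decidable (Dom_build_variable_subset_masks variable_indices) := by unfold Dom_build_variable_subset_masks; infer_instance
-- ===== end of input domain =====

-- B recomputes each subset mask independently (per-mask OR over its set bits) instead of A's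
-- subset-DP that reuses the previously computed table entry; objective: alternative structure.


-- ===== PORT A =====
-- Literal port of A: max_mask = 1 << len, table of zeros, DP over range(1, max_mask)
-- using lsb = m & -m, bit_idx = lsb.bit_length() - 1 and the previously filled entry m ^ lsb.
-- List indexing uses pyGetD/ set with .toNat: every index read/written is provably
-- nonnegative and in range (1 ≤ m < max_mask, 0 ≤ m ^ lsb < m), so this is Python-exact;
-- the shift count variable_indices[bit_idx] is nonnegative exactly on Pre_ (Python raises
-- ValueError on a negative shift, which Pre_ excludes).
def build_variable_subset_masks (variable_indices : List Int) : List Int :=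
  let max_mask : Nat := 1 <<< variable_indices.length
  let init : List Int := List.replicate max_mask 0
  (PySem.List.pyRange 1 (max_mask : Int) 1).foldl
    (fun subset_masks subset_mask =>
      let lsb : Int := PySem.Int.band subset_mask (-subset_mask)
      let bit_idx : Nat := PySem.Int.bitLength lsb - 1
      let v : Int := PySem.Int.bor
        (PySem.List.pyGetD subset_masks (PySem.Int.bxor subset_mask lsb) 0)
        (1 <<< (PySem.List.pyGetD variable_indices (bit_idx : Int) 0).toNat)
      subset_masks.set subset_mask.toNat v)
    init

-- ===== PORT B =====
-- Literal port of B: precompute bit_values, then each mask's value is computed from scratch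
-- by OR-ing bit_values[i] for every bit i set in the mask (no reuse of earlier entries).
-- Shift counts use .toNat: nonnegative exactly on Pre_ (enumerate indices are always ≥ 0).
def build_variable_subset_masks_alt (variable_indices : List Int) : List Int :=
  let bit_values : List Int := variable_indices.map (fun i => ((1 <<< i.toNat : Int)))
  let mask_value : Int → Int := fun mask =>
    (PySem.List.enumerate bit_values).foldl
      (fun acc p => if PySem.Int.band (mask >>> p.1.toNat) 1 == 1 then PySem.Int.bor acc p.2 else acc)
      0
  (PySem.List.pyRange 0 ((1 <<< variable_indices.length : Nat) : Int) 1).map mask_value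

-- ===== PRECONDITION & SPEC =====
-- Pre_ excludes lists containing a negative index, on which BOTH A and B raise
-- ValueError in Python ('negative shift count' from 1 << i); A is total otherwise.
def Pre_build_variable_subset_masks (variable_indices : List Int) : Prop :=
  ∀ i ∈ variable_indices, 0 ≤ i
instance (variable_indices : List Int) : Decidable (Pre_build_variable_subset_masks variable_indices) := by unfold Pre_build_variable_subset_masks; infer_instance
def pvWitness_build_variable_subset_masks : List Int := [0, 2, 1]

def Spec_build_variable_subset_masks (variable_indices : List Int) (out : List Int) : Prop := out = build_variable_subset_masks_alt variable_indices
instance (variable_indices : List Int) (out : List Int) : Decidable (Spec_build_variable_subset_masks variable_indices out) := by unfold Spec_build_variable_subset_masks; infer_instance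

-- ===== CLAIM (what is proved, stated in full; the proofs are below) =====
def Claim_equal_build_variable_subset_masks : Prop := ∀ (variable_indices : List Int), Dom_build_variable_subset_masks variable_indices → Pre_build_variable_subset_masks variable_indices → Spec_build_variable_subset_masks variable_indices (build_variable_subset_masks variable_indices)

-- ===== LEMMAS AND PROOFS =====

-- natFold: Nat-level view of B's per-mask inner loop (bits s, s+1, … over the list tail)
def natFold : List Int → Nat → Nat → Nat → Nat
  | [], _, _, acc => acc
  | e :: t, s, m, acc => natFold t (s + 1) m (if m.testBit s then acc ||| (1 <<< e.toNat) else acc)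

def natVal (vi : List Int) (m : Nat) : Nat := natFold vi 0 m 0

theorem natFold_zero (l : List Int) (s acc : Nat) : natFold l s 0 acc = acc := by
  induction l generalizing s acc with
  | nil => rfl
  | cons e t ih => simp [natFold, Nat.zero_testBit, ih]

theorem natFold_pull (l : List Int) (s m acc x : Nat) :
    natFold l s m (acc ||| x) = natFold l s m acc ||| x := by
  induction l generalizing s acc with
  | nil => rfl
  | cons e t ih =>
    simp only [natFold]
    by_cases h : m.testBit s
    · simp only [h, if_true]
      rw [Nat.lor_assoc, Nat.lor_comm x, ← Nat.lor_assoc, ih]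
    · simp [h, ih]

theorem natFold_congr (l : List Int) (s m m' acc : Nat)
    (h : ∀ i, s ≤ i → m.testBit i = m'.testBit i) :
    natFold l s m acc = natFold l s m' acc := by
  induction l generalizing s acc with
  | nil => rfl
  | cons e t ih =>
    simp only [natFold, h s le_rfl]
    exact ih (s + 1) _ (fun i hi => h i (by omega))

theorem natFold_or_bit (l : List Int) (s m m' j acc : Nat)
    (hsj : s ≤ j) (hjl : j < s + l.length)
    (h1 : ∀ i, i ≠ j → m.testBit i = m'.testBit i)
    (h2 : m.testBit j = true) (h3 : m'.testBit j = false) :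
    natFold l s m acc = natFold l s m' acc ||| (1 <<< (l.getD (j - s) 0).toNat) := by
  induction l generalizing s acc with
  | nil => simp at hjl; omega
  | cons e t ih =>
    simp only [natFold]
    by_cases hs : s = j
    · subst hs
      simp only [h2, h3, if_true, Nat.sub_self, List.getD_cons_zero]
      rw [natFold_pull]
      exact congrArg (· ||| _) (natFold_congr t (s + 1) m m' acc
        (fun i hi => h1 i (by omega)))
    · have hlt : s < j := lt_of_le_of_ne hsj hs
      rw [h1 s (by omega)]
      have hd : j - s = (j - (s + 1)) + 1 := by omega
      rw [hd, List.getD_cons_succ]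
      simp only [List.length_cons] at hjl
      exact ih (s + 1) _ (by omega) (by omega)

-- decomposition of a positive mask: m = 2^j * (2k+1); the facts A's lsb trick rests on
theorem mask_decomp (m : Nat) (hm : 0 < m) :
    ∃ j k, m = 2 ^ j * (2 * k + 1) := by
  obtain ⟨j, o, ho, hmo⟩ := Nat.exists_eq_two_pow_mul_odd (Nat.pos_iff_ne_zero.mp hm)
  obtain ⟨k, hk⟩ := ho
  exact ⟨j, k, by rw [hmo]; congr 1⟩

theorem bits_m (j k i : Nat) :
    (2 ^ j * (2 * k + 1)).testBit i = (decide (i ≥ j) && (2 * k + 1).testBit (i - j)) :=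
  Nat.testBit_two_pow_mul

theorem bits_r (j k i : Nat) :
    (2 ^ j * (2 * k)).testBit i = (decide (i ≥ j) && (2 * k).testBit (i - j)) :=
  Nat.testBit_two_pow_mul

theorem bit_j_m (j k : Nat) : (2 ^ j * (2 * k + 1)).testBit j = true := by
  rw [bits_m]; simp [Nat.testBit_zero]

theorem bit_j_r (j k : Nat) : (2 ^ j * (2 * k)).testBit j = false := by
  rw [bits_r]; simp [Nat.testBit_zero]

theorem bit_ne_j (j k i : Nat) (hij : i ≠ j) :
    (2 ^ j * (2 * k + 1)).testBit i = (2 ^ j * (2 * k)).testBit i := by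
  rw [bits_m, bits_r]
  by_cases h : j ≤ i
  · have : i - j = (i - j - 1) + 1 := by omega
    rw [this, Nat.testBit_add_one, Nat.testBit_add_one]
    have h1 : (2 * k + 1) / 2 = k := by omega
    have h2 : (2 * k) / 2 = k := by omega
    rw [h1, h2]
  · simp [h]

theorem land_pred (j k : Nat) :
    (2 ^ j * (2 * k + 1)) &&& (2 ^ j * (2 * k + 1) - 1) = 2 ^ j * (2 * k) := by
  have hpos := Nat.two_pow_pos j
  have hsub : 2 ^ j * (2 * k + 1) - 1 = 2 ^ j * (2 * k) + (2 ^ j - 1) := by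
    have e : 2 ^ j * (2 * k + 1) = 2 ^ j * (2 * k) + 2 ^ j := by ring
    omega
  apply Nat.eq_of_testBit_eq
  intro i
  rw [Nat.testBit_and, hsub,
    Nat.testBit_two_pow_mul_add _ (by omega) i]
  by_cases hij : i = j
  · subst hij
    simp [bit_j_m, bit_j_r, Nat.testBit_zero]
  · rw [bit_ne_j j k i hij]
    by_cases h : i < j
    · simp [h, bits_r, Nat.testBit_two_pow_sub_one]
    · cases hb : (2 * k).testBit (i - j) <;>
        simp [h, bits_r, hb, show i ≥ j by omega]
theorem xor_low (j k : Nat) :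
    2 ^ j * (2 * k + 1) ^^^ 2 ^ j = 2 ^ j * (2 * k) := by
  apply Nat.eq_of_testBit_eq
  intro i
  rw [Nat.testBit_xor, Nat.testBit_two_pow]
  by_cases hij : i = j
  · subst hij; simp [bit_j_m, bit_j_r]
  · simp [Ne.symm hij, bit_ne_j j k i hij]

-- Python's m & -m for a positive m, through PySem's two's-complement band
theorem band_neg_self (m : Nat) (hm : 0 < m) :
    PySem.Int.band (m : Int) (-(m : Int)) = ((m - (m &&& (m - 1)) : Nat) : Int) := by
  have h1 : (0 : Int) ≤ (m : Int) := by positivity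
  have h2 : ¬ (0 : Int) ≤ -(m : Int) := by omega
  simp [PySem.Int.band, h1, hm.ne']

theorem bitLength_two_pow (j : Nat) :
    PySem.Int.bitLength ((2 ^ j : Nat) : Int) = j + 1 := by
  have hne : ((2 ^ j : Nat) : Int) ≠ 0 := by positivity
  have hle := PySem.Int.two_pow_bitLength_le ((2 ^ j : Nat) : Int) hne
  have hlt := PySem.Int.lt_two_pow_bitLength ((2 ^ j : Nat) : Int)
  rw [Int.natAbs_natCast] at hle hlt
  have hj := (Nat.pow_lt_pow_iff_right (by norm_num : 1 < 2)).mp hlt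
  by_cases hz : PySem.Int.bitLength ((2 ^ j : Nat) : Int) = 0
  · rw [hz] at hlt; simp at hlt
  · have := (Nat.pow_le_pow_iff_right (by norm_num : 1 < 2)).mp hle
    omega

-- B's inner fold over enumerate equals natFold (Nat view)
theorem inner_bridge (l : List Int) (s m acc : Nat) :
    (PySem.List.enumerate (l.map (fun i => ((1 <<< i.toNat : Int)))) (s : Int)).foldl
      (fun acc p => if PySem.Int.band ((m : Int) >>> p.1.toNat) 1 == 1 then PySem.Int.bor acc p.2 else acc)
      (acc : Int) = ((natFold l s m acc : Nat) : Int) := by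
  induction l generalizing s acc with
  | nil => rfl
  | cons e t ih =>
    rw [List.map_cons, PySem.List.enumerate_cons, List.foldl_cons]
    have hcond : (PySem.Int.band ((m : Int) >>> ((((s : Int)).toNat : Nat) : Int)) 1 == 1)
        = m.testBit s := by
      rw [Int.toNat_natCast, Int.shiftRight_natCast]
      have hband : PySem.Int.band ((m >>> s : Nat) : Int) 1 = ((m >>> s &&& 1 : Nat) : Int) := by
        exact_mod_cast PySem.Int.band_natCast (m >>> s) 1
      rw [hband]
      have hx : m >>> s % 2 = 0 ∨ m >>> s % 2 = 1 := by omega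
      rcases hx with h | h <;>
        simp [Nat.testBit, Nat.and_one_is_mod, Nat.one_and_eq_mod_two, h]
    have hcast : (1 <<< e.toNat : Int) = ((1 <<< e.toNat : Nat) : Int) := by
      simp [Nat.shiftLeft_eq]
    have hstep : ((s : Int) + 1) = ((s + 1 : Nat) : Int) := by push_cast; ring
    simp only [hcond, natFold]
    by_cases h : m.testBit s
    · simp only [h, if_true]
      rw [hcast, PySem.Int.bor_natCast, hstep, ih]
    · simp only [h, Bool.false_eq_true, if_false]
      rw [hstep, ih]

theorem set_map_range {β : Type} (K t : Nat) (f : Nat → β) (v : β) :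
    (List.map f (List.range K)).set t v
      = List.map (fun j => if j = t then v else f j) (List.range K) := by
  apply List.ext_getElem
  · simp
  · intro i h1 h2
    simp only [List.getElem_set, List.getElem_map, List.getElem_range]
    simp only [List.length_set, List.length_map, List.length_range] at h1
    by_cases hit : i = t
    · simp [hit]
    · have hti : ¬ t = i := fun h => hit h.symm
      simp [hit, hti]
-- the value A's DP step computes at mask t equals B's from-scratch value natVal t
theorem natVal_step (vi : List Int) (t : Nat) (_ht0 : 0 < t) (htK : t < 2 ^ vi.length)
    (j k : Nat) (hdec : t = 2 ^ j * (2 * k + 1)) :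
    natVal vi t = natVal vi (2 ^ j * (2 * k)) ||| (1 <<< (vi.getD j 0).toNat) := by
  have hj : j < vi.length := by
    have h1 : 2 ^ j ≤ t := by
      calc 2 ^ j ≤ 2 ^ j * (2 * k + 1) := Nat.le_mul_of_pos_right _ (by omega)
        _ = t := hdec.symm
    exact (Nat.pow_lt_pow_iff_right (by norm_num : 1 < 2)).mp (lt_of_le_of_lt h1 htK)
  have := natFold_or_bit vi 0 t (2 ^ j * (2 * k)) j 0 (Nat.zero_le j) (by omega)
    (fun i hij => by rw [hdec]; exact bit_ne_j j k i hij)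
    (by rw [hdec]; exact bit_j_m j k) (bit_j_r j k)
  simpa [natVal] using this

-- the step function of A's fold (named, so the invariant can talk about it)
def stepA (vi : List Int) (subset_masks : List Int) (subset_mask : Int) : List Int :=
  let lsb : Int := PySem.Int.band subset_mask (-subset_mask)
  let bit_idx : Nat := PySem.Int.bitLength lsb - 1
  let v : Int := PySem.Int.bor
    (PySem.List.pyGetD subset_masks (PySem.Int.bxor subset_mask lsb) 0)
    (1 <<< (PySem.List.pyGetD vi (bit_idx : Int) 0).toNat)
  subset_masks.set subset_mask.toNat v

theorem stepA_correct (vi : List Int) (t : Nat) (ht0 : 0 < t) (htK : t < 2 ^ vi.length) :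
    stepA vi ((List.range (2 ^ vi.length)).map
        (fun jj => if jj < t then ((natVal vi jj : Nat) : Int) else 0)) (t : Int)
      = (List.range (2 ^ vi.length)).map
        (fun jj => if jj < t + 1 then ((natVal vi jj : Nat) : Int) else 0) := by
  obtain ⟨j, k, hdec⟩ := mask_decomp t ht0
  have hland : t &&& (t - 1) = 2 ^ j * (2 * k) := by rw [hdec]; exact land_pred j k
  have hsub : t - (t &&& (t - 1)) = 2 ^ j := by
    rw [hland, hdec]
    have e : 2 ^ j * (2 * k + 1) = 2 ^ j * (2 * k) + 2 ^ j := by ring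
    rw [e, Nat.add_sub_cancel_left]
  have hxor : t ^^^ 2 ^ j = 2 ^ j * (2 * k) := by rw [hdec]; exact xor_low j k
  have hr_lt : 2 ^ j * (2 * k) < t := by
    rw [hdec]
    have := Nat.two_pow_pos j
    nlinarith
  simp only [stepA]
  rw [band_neg_self t ht0, hsub, bitLength_two_pow j, Nat.add_sub_cancel,
    PySem.Int.bxor_natCast, hxor, PySem.List.pyGetD_natCast,
    PySem.List.getD_map_range _ _ _ _ (by omega), if_pos hr_lt,
    PySem.List.pyGetD_natCast]
  have hcast : (1 <<< (vi.getD j 0).toNat : Int) = (((1 <<< (vi.getD j 0).toNat : Nat) : Nat) : Int) := by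
    simp [Nat.shiftLeft_eq]
  rw [hcast, PySem.Int.bor_natCast, Int.toNat_natCast, set_map_range]
  apply List.map_congr_left
  intro jj hjj
  by_cases hjt : jj = t
  · subst hjt
    rw [if_pos rfl, if_pos (by omega)]
    exact congrArg _ (natVal_step vi jj ht0 htK j k hdec).symm
  · rw [if_neg hjt]
    by_cases hlt : jj < t
    · rw [if_pos hlt, if_pos (by omega)]
    · rw [if_neg hlt, if_neg (by omega)]

-- A's fold invariant: after masks 1..t the table holds natVal on [0, t) and 0 above
theorem Ainv (vi : List Int) (t : Nat) (htK : t ≤ 2 ^ vi.length) :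
    (PySem.List.pyRange 1 (t : Int) 1).foldl (stepA vi)
        (List.replicate (2 ^ vi.length) (0 : Int))
      = (List.range (2 ^ vi.length)).map
        (fun jj => if jj < t then ((natVal vi jj : Nat) : Int) else 0) := by
  induction t with
  | zero =>
    rw [PySem.List.pyRange_one_eq_nil (by norm_num)]
    simp [List.map_const']
  | succ t ih =>
    have ih' := ih (by omega)
    by_cases ht0 : t = 0
    · subst ht0
      have h01 : ((0 + 1 : Nat) : Int) = 1 := by norm_num
      rw [h01, PySem.List.pyRange_one_eq_nil le_rfl]
      simp only [List.foldl_nil]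
      apply List.ext_getElem (by simp)
      intro i h1 h2
      simp only [List.getElem_replicate, List.getElem_map, List.getElem_range]
      by_cases hi : i < 1
      · have : i = 0 := by omega
        simp [this, natVal, natFold_zero]
      · simp [hi]
    · have h1t : (1 : Int) ≤ (t : Nat) := by omega
      rw [show ((t + 1 : Nat) : Int) = ((t : Nat) : Int) + 1 by push_cast; ring,
        PySem.List.pyRange_one_succ_right h1t, List.foldl_append, List.foldl_cons,
        List.foldl_nil, ih']
      exact stepA_correct vi t (by omega) (by omega)
theorem portA_eq_natVal (vi : List Int) :
    build_variable_subset_masks vi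
      = (List.range (2 ^ vi.length)).map (fun jj => ((natVal vi jj : Nat) : Int)) := by
  show (PySem.List.pyRange 1 ((1 <<< vi.length : Nat) : Int) 1).foldl (stepA vi)
      (List.replicate (1 <<< vi.length) (0 : Int)) = _
  rw [Nat.one_shiftLeft, Ainv vi (2 ^ vi.length) le_rfl]
  apply List.map_congr_left
  intro jj hjj
  rw [if_pos (List.mem_range.mp hjj)]

theorem portB_eq_natVal (vi : List Int) :
    build_variable_subset_masks_alt vi
      = (List.range (2 ^ vi.length)).map (fun jj => ((natVal vi jj : Nat) : Int)) := by
  show (PySem.List.pyRange 0 ((1 <<< vi.length : Nat) : Int) 1).map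
      (fun mask => (PySem.List.enumerate (vi.map (fun i => ((1 <<< i.toNat : Int)))) 0).foldl
        (fun acc p => if PySem.Int.band (mask >>> (p.1.toNat : Int)) 1 == 1 then PySem.Int.bor acc p.2 else acc)
        0) = _
  rw [Nat.one_shiftLeft, PySem.List.pyRange_zero_nat, List.map_map]
  apply List.map_congr_left
  intro t _
  have h := inner_bridge vi 0 t 0
  simp only [Nat.cast_zero] at h
  exact h


-- ===== VERDICT (by name: the statement is the Claim_ definition above) =====
theorem build_variable_subset_masks_spec : Claim_equal_build_variable_subset_masks := by
  intro vi _hdom _hpre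
  unfold Spec_build_variable_subset_masks
  exact (portA_eq_natVal vi).trans (portB_eq_natVal vi).symm
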